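-- pv_equiv track=rewrite | github.com/lmnogues/adventofcode | 2019/20191208.py | process_layers
-- ===== SOURCE A (Python) =====
-- def process_layers(layers):
--     layers.reverse()
--     final_layer = [c for c in layers[0]]
--
--     for layer in layers:
--         for i in range(len(layer)):
--             if layer[i] != '2':
--                 final_layer[i] = layer[i]
--     return ''.join(final_layer)
-- ===== SOURCE B (Python) =====
-- def process_layers(layers):
--     background = layers[-1]
--
--     def pixel(i):
--         for layer in layers:
--             if i < len(layer) and layer[i] != '2':
--                 return layer[i]
--         return '2'
--
--     return ''.join(pixel(i) for i in range(len(background)))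
-- ===== Notes on version B (the rewrite author's own statement) =====
-- stated objective: simpler
-- what changed: B computes the image pixel-by-pixel: the last layer is the background that fixes the image width, and each pixel is the topmost non-transparent (non-'2') value scanning the layers in order, instead of A's reversed layer-by-layer overwriting of a mutable buffer; equivalence is about the return value only (A also reverses its argument list in place, B does not mutate it). Constant-factor speedup: each pixel stops at the first opaque layer and nothing is written twice, where A rewrites buffer cells once per layer.
import Mathlib
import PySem

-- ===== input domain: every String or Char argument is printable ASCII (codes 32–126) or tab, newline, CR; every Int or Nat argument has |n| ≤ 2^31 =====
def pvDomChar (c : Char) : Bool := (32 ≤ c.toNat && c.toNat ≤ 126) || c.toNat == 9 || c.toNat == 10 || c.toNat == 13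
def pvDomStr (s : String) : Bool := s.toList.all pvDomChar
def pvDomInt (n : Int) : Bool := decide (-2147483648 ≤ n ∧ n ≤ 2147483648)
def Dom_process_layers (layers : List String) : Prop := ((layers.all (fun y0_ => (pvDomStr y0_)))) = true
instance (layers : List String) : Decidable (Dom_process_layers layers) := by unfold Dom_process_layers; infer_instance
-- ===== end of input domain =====

-- B computes the image pixel-by-pixel (background = last layer fixes the width; each pixel is the
-- topmost non-'2' value) instead of A's reversed layer-by-layer overwriting of a buffer; the
-- equivalence is about the RETURN value only — the Python A also reverses its argument list in
-- place, B does not mutate it.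

-- ===== PORT A =====
-- inner loop: for i in range(len(layer)): if layer[i] != '2': final_layer[i] = layer[i]
-- (List.set is a no-op out of range; Python raises there, excluded by Pre_)
def pvInnerA (fl : List Char) (layer : String) : List Char :=
  (List.range layer.toList.length).foldl
    (fun fl i => if layer.toList.getD i '2' ≠ '2' then fl.set i (layer.toList.getD i '2') else fl) fl

def process_layers (layers : List String) : String :=
  let rev := layers.reverse
  let final0 : List Char := (rev.headD "").toList
  String.ofList (rev.foldl pvInnerA final0)

-- ===== PORT B =====
-- pixel(i): the first layer (top to bottom) with an opaque value at i, else transparent '2'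
def process_layers_alt (layers : List String) : String :=
  let background := (layers.getLast?).getD ""
  String.ofList ((List.range background.toList.length).map (fun i =>
    match layers.find? (fun l => decide (i < l.toList.length ∧ l.toList.getD i '2' ≠ '2')) with
    | some l => l.toList.getD i '2'
    | none => '2'))

-- ===== PRECONDITION & SPEC =====
-- Pre_ admits exactly the inputs on which the Python A returns: a non-empty list in which no layer
-- has a non-'2' character at an index ≥ len(last layer) (there A's buffer assignment raises IndexError).
def Pre_process_layers (layers : List String) : Prop :=
  layers ≠ [] ∧
    (layers.all (fun l =>
      (l.toList.drop ((layers.getLast?).getD "").toList.length).all (fun c => c == '2'))) = true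
instance (layers : List String) : Decidable (Pre_process_layers layers) := by
  unfold Pre_process_layers; infer_instance
def pvWitness_process_layers : List String := ["212", "01"]

def Spec_process_layers (layers : List String) (out : String) : Prop := out = process_layers_alt layers
instance (layers : List String) (out : String) : Decidable (Spec_process_layers layers out) := by unfold Spec_process_layers; infer_instance

-- ===== CLAIM (what is proved, stated in full; the proofs are below) =====
def Claim_equal_process_layers : Prop := ∀ (layers : List String), Dom_process_layers layers → Pre_process_layers layers → Spec_process_layers layers (process_layers layers)

-- ===== LEMMAS AND PROOFS =====

-- any fold of conditional set's keeps the buffer length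
theorem pvFoldSet_length (layer : String) (L : List Nat) :
    ∀ (fl : List Char),
      (L.foldl (fun fl i => if layer.toList.getD i '2' ≠ '2' then fl.set i (layer.toList.getD i '2') else fl) fl).length
        = fl.length := by
  induction L with
  | nil => intro fl; rfl
  | cons j js ih =>
      intro fl
      simp only [List.foldl_cons]
      split <;> [rw [ih, List.length_set]; exact ih _]

theorem pvInnerA_length (layer : String) (fl : List Char) :
    (pvInnerA fl layer).length = fl.length :=
  pvFoldSet_length layer (List.range layer.toList.length) fl

-- element view of the inner loop (positions below the buffer length)
theorem pvInnerA_getD (layer : String) :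
    ∀ (m : Nat) (fl : List Char) (i : Nat), i < fl.length →
      (((List.range m).foldl
        (fun fl i => if layer.toList.getD i '2' ≠ '2' then fl.set i (layer.toList.getD i '2') else fl) fl).getD i '2')
      = if i < m ∧ layer.toList.getD i '2' ≠ '2' then layer.toList.getD i '2' else fl.getD i '2' := by
  intro m
  induction m with
  | zero => intro fl i hi; simp
  | succ m ih =>
      intro fl i hi
      rw [List.range_succ, List.foldl_append, List.foldl_cons, List.foldl_nil]
      set F := (List.range m).foldl
        (fun fl i => if layer.toList.getD i '2' ≠ '2' then fl.set i (layer.toList.getD i '2') else fl) fl with hF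
      have hFlen : F.length = fl.length := pvFoldSet_length layer (List.range m) fl
      by_cases hm : i = m
      · subst hm
        by_cases hc : layer.toList.getD i '2' ≠ '2'
        · rw [if_pos hc, if_pos ⟨Nat.lt_succ_self i, hc⟩]
          rw [List.getD, List.getElem?_set_self (by omega), Option.getD_some]
        · rw [if_neg hc, ih fl i hi]
          simp only [not_not] at hc
          simp only [List.getD] at hc ⊢
          simp [hc]
      · have : (if layer.toList.getD m '2' ≠ '2' then F.set m (layer.toList.getD m '2') else F).getD i '2'
            = F.getD i '2' := by
          split
          · rw [List.getD, List.getElem?_set_ne (by omega)]; rfl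
          · rfl
        rw [this, ih fl i hi]
        by_cases him : i < m
        · simp [him, Nat.lt_succ_of_lt him]
        · have : ¬ i < m + 1 := by omega
          simp [him, this]

theorem pvInnerA_getD' (layer : String) (fl : List Char) (i : Nat) (hi : i < fl.length) :
    (pvInnerA fl layer).getD i '2'
      = if i < layer.toList.length ∧ layer.toList.getD i '2' ≠ '2'
        then layer.toList.getD i '2' else fl.getD i '2' :=
  pvInnerA_getD layer layer.toList.length fl i hi

theorem pvFold_length : ∀ (L : List String) (fl : List Char),
    (L.foldl pvInnerA fl).length = fl.length := by
  intro L
  induction L with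
  | nil => intro fl; rfl
  | cons x L ih => intro fl; rw [List.foldl_cons, ih, pvInnerA_length]

-- element view of the outer loop: the LAST layer of L that writes position i wins,
-- i.e. the FIRST such layer of L.reverse
theorem pvFold_getD : ∀ (L : List String) (fl : List Char) (i : Nat), i < fl.length →
    ((L.foldl pvInnerA fl).getD i '2')
      = match L.reverse.find? (fun l => decide (i < l.toList.length ∧ l.toList.getD i '2' ≠ '2')) with
        | some l => l.toList.getD i '2'
        | none => fl.getD i '2' := by
  intro L
  induction L with
  | nil => intro fl i hi; simp
  | cons x L ih =>
      intro fl i hi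
      rw [List.foldl_cons, ih _ i (by rw [pvInnerA_length]; exact hi)]
      rw [List.reverse_cons, List.find?_append]
      cases hfind : L.reverse.find? (fun l => decide (i < l.toList.length ∧ l.toList.getD i '2' ≠ '2')) with
      | some l => simp [hfind]
      | none =>
          rw [pvInnerA_getD' x fl i hi]
          by_cases hp : i < x.toList.length ∧ x.toList.getD i '2' ≠ '2'
          · rw [if_pos hp]
            simp only [List.getD]
            simp only [List.find?_singleton, Option.none_or, decide_eq_true_eq,
              String.length_toList]
            rw [if_pos ⟨by simpa using hp.1, by simpa [List.getD] using hp.2⟩]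
          · rw [if_neg hp]
            simp only [List.getD]
            simp only [List.find?_singleton, Option.none_or, decide_eq_true_eq,
              String.length_toList]
            rw [if_neg (fun h => hp ⟨by simpa using h.1, by simpa [List.getD] using h.2⟩)]

theorem process_layers_spec : Claim_equal_process_layers := by
  intro layers _ hpre
  obtain ⟨hne, -⟩ := hpre
  unfold Spec_process_layers process_layers process_layers_alt
  simp only []
  congr 1
  have hlast : layers.reverse.headD "" = (layers.getLast?).getD "" := by
    rw [List.headD_eq_head?_getD, List.head?_reverse]
  set last := (layers.getLast?).getD "" with hlastdef
  set n := last.toList.length with hn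
  rw [hlast]
  apply List.ext_getElem
  · rw [pvFold_length]; simp [hn]
  · intro i h1 h2
    have hi : i < n := by simpa using h2
    have hget : ∀ (xs : List Char) (h : i < xs.length), xs[i] = xs.getD i '2' := by
      intro xs h; rw [List.getD, List.getElem?_eq_getElem h]; rfl
    rw [hget _ h1, hget _ h2]
    rw [pvFold_getD layers.reverse last.toList i (hn ▸ hi), List.reverse_reverse]
    conv_rhs => rw [List.getD, List.getElem?_eq_getElem h2, Option.getD_some, List.getElem_map,
      List.getElem_range]
    cases hfind : layers.find? (fun l => decide (i < l.toList.length ∧ l.toList.getD i '2' ≠ '2')) with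
    | some l => simp [hfind]
    | none =>
        simp only [hfind]
        -- no layer writes position i, so the buffer keeps last[i], which must be '2'
        have hmem : last ∈ layers := by
          cases h : layers.getLast? with
          | none => exact absurd (List.getLast?_eq_none_iff.mp h) hne
          | some l => rw [hlastdef, h]; exact List.mem_of_getLast? h
        have hnp := List.find?_eq_none.mp hfind last hmem
        have hnot : ¬ (i < last.toList.length ∧ last.toList.getD i '2' ≠ '2') := by
          simpa using hnp
        by_contra hc
        exact hnot ⟨hn ▸ hi, hc⟩
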